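-- pv_equiv track=rewrite | github.com/jk-jung/problem-solving | codewars/6kyu/6_Simple Fun #180: Repeat Adjacent.py | repeat_adjacent
-- ===== SOURCE A (Python) =====
-- from itertools import groupby
--
-- def repeat_adjacent(s):
--     r = 0
--     c = 0
--     for k, v in groupby(s + '_'):
--         if len(list(v)) == 1:
--             if c >= 2: r += 1
--             c = 0
--         else:
--             c += 1
--     return r
-- ===== SOURCE B (Python) =====
-- from itertools import groupby
--
--
-- def repeat_adjacent(s):
--     flags = [len(list(g)) > 1 for _, g in groupby(s + '_')]
--     return sum(1 for a, b, c in zip(flags, flags[1:], flags[2:])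
--                if a and b and not c)
-- ===== Notes on version B (the rewrite author's own statement) =====
-- stated objective: idiomatic
-- what changed: A's single-pass counter-and-flush state machine over groupby is replaced by a two-stage pipeline: first build a list of boolean flags marking repeated groups, then count (True, True, False) triples over a sliding zip window of that list.
import Mathlib
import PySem

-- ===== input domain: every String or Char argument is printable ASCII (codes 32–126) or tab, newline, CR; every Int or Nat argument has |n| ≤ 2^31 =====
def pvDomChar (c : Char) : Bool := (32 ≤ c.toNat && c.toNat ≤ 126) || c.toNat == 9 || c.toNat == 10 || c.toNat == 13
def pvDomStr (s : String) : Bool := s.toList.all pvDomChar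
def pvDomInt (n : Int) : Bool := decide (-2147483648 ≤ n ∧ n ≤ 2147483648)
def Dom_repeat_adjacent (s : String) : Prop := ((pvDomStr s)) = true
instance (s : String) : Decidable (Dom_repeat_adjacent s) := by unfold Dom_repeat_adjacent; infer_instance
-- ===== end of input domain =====

-- B replaces A's counter-and-flush state machine by an idiomatic two-stage pipeline:
-- build a list of boolean flags marking repeated groups, then count flag triples (True, True, False)
-- over a sliding zip window; objective: idiomatic, same cost.

-- shared helper: itertools.groupby with group lengths (run-length encoding)
def pvRle : List Char → List (Char × Nat)
  | [] => []
  | c :: rest =>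
    match pvRle rest with
    | [] => [(c, 1)]
    | (d, n) :: t => if c = d then (d, n + 1) :: t else (c, 1) :: (d, n) :: t

-- ===== PORT A =====
def repeat_adjacent (s : String) : Int :=
  ((pvRle (s.toList ++ ['_'])).foldl
    (fun (st : Int × Int) g =>
      if g.2 == 1 then (if 2 ≤ st.2 then st.1 + 1 else st.1, 0)
      else (st.1, st.2 + 1)) (0, 0)).1

-- ===== PORT B =====
-- the 'sum(1 for a,b,c in zip(flags, flags[1:], flags[2:]) if a and b and not c)' line of Source B
-- (flags[1:]/flags[2:] = drop 1/drop 2, exact since the slice bounds are nonnegative)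
def pvCountZ (fs : List Bool) : Int :=
  ((fs.zip ((fs.drop 1).zip (fs.drop 2))).filter
    (fun t => t.1 && t.2.1 && !t.2.2)).length

def repeat_adjacent_alt (s : String) : Int :=
  pvCountZ ((pvRle (s.toList ++ ['_'])).map (fun g => decide (1 < g.2)))

-- ===== PRECONDITION & SPEC =====
def Spec_repeat_adjacent (s : String) (out : Int) : Prop := out = repeat_adjacent_alt s
instance (s : String) (out : Int) : Decidable (Spec_repeat_adjacent s out) := by unfold Spec_repeat_adjacent; infer_instance

-- ===== CLAIM (what is proved, stated in full; the proofs are below) =====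
def Claim_equal_repeat_adjacent : Prop := ∀ (s : String), Dom_repeat_adjacent s → Spec_repeat_adjacent s (repeat_adjacent s)

-- ===== LEMMAS AND PROOFS =====

-- every run length produced by pvRle is at least 1
theorem pvRle_pos (l : List Char) : ∀ p ∈ pvRle l, 1 ≤ p.2 := by
  induction l with
  | nil => simp [pvRle]
  | cons c rest ih =>
    simp only [pvRle]
    cases h : pvRle rest with
    | nil => simp
    | cons q t =>
      obtain ⟨d, n⟩ := q
      have ih' := h ▸ ih
      by_cases hc : c = d
      · simp only [hc]
        intro p hp
        rcases List.mem_cons.mp hp with h1 | h2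
        · subst h1; omega
        · exact ih' p (List.mem_cons_of_mem _ h2)
      · simp only [if_neg hc]
        intro p hp
        rcases List.mem_cons.mp hp with h1 | h2
        · subst h1; omega
        · exact ih' p h2

-- one step of the sliding-window count
theorem pvCountZ_step (x y z : Bool) (t : List Bool) :
    pvCountZ (x :: y :: z :: t) =
      (if x && y && !z then 1 else 0) + pvCountZ (y :: z :: t) := by
  simp only [pvCountZ, List.drop, List.zip_cons_cons, List.filter]
  by_cases h : (x && y && !z) = true
  · simp [h]; omega
  · simp [h]

-- two leading false flags contribute nothing to the window count
theorem pvCountZ_pad (fs : List Bool) :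
    pvCountZ (false :: false :: fs) = pvCountZ fs := by
  match fs with
  | [] => simp [pvCountZ]
  | [a] => simp [pvCountZ]
  | a :: b :: t =>
    rw [pvCountZ_step, pvCountZ_step]
    simp

-- boolean shuffle used when a length-1 group flushes the counter
theorem pvAux (b1 b2 : Bool) : (b2 && b1 && !false) = (b1 && b2) := by
  cases b1 <;> cases b2 <;> rfl

-- main invariant: A's foldl over the run-length list equals the window count over the
-- flag list prefixed by two booleans b2, b1 encoding the current counter c
theorem pv_main (ps : List (Char × Nat)) (r c : Int) (b1 b2 : Bool)
    (hpos : ∀ p ∈ ps, 1 ≤ p.2) (hc0 : 0 ≤ c)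
    (h1 : 1 ≤ c ↔ b1 = true) (h2 : 2 ≤ c ↔ (b1 && b2) = true) :
    ((ps.foldl
      (fun (st : Int × Int) g =>
        if g.2 == 1 then (if 2 ≤ st.2 then st.1 + 1 else st.1, 0)
        else (st.1, st.2 + 1)) (r, c)).1) =
      r + pvCountZ (b2 :: b1 :: ps.map (fun g => decide (1 < g.2))) := by
  induction ps generalizing r c b1 b2 with
  | nil => simp [pvCountZ]
  | cons p t ih =>
    obtain ⟨k, n⟩ := p
    have hn : 1 ≤ n := hpos (k, n) (List.mem_cons_self)
    have hpos' : ∀ q ∈ t, 1 ≤ q.2 := fun q hq => hpos q (List.mem_cons_of_mem _ hq)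
    by_cases hone : n = 1
    · subst hone
      simp only [List.foldl_cons, List.map_cons]
      have hflag : decide (1 < 1) = false := by decide
      rw [hflag, pvCountZ_step]
      have := ih (if 2 ≤ c then r + 1 else r) 0 false b1 hpos' (by omega)
        (by simp) (by simp)
      simp only [beq_self_eq_true, if_pos] at this ⊢
      rw [this]
      by_cases hc : 2 ≤ c
      · have hb : (b1 && b2) = true := h2.mp hc
        rw [if_pos hc, pvAux b1 b2, hb]
        generalize pvCountZ (b1 :: false :: List.map (fun g => decide (1 < g.2)) t) = X
        split_ifs with hsi
        · omega
        · exact absurd rfl hsi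
      · have hb : (b1 && b2) = false := by
          cases hb : (b1 && b2)
          · rfl
          · exact absurd (h2.mpr hb) hc
        rw [if_neg hc, pvAux b1 b2, hb]
        generalize pvCountZ (b1 :: false :: List.map (fun g => decide (1 < g.2)) t) = X
        split_ifs <;> first | omega | exact (‹False›).elim
    · have hn2 : 2 ≤ n := by omega
      simp only [List.foldl_cons, List.map_cons]
      have hflag : decide (1 < n) = true := by simp; omega
      have hbeq : (n == 1) = false := by simp [hone]
      rw [hflag, hbeq, pvCountZ_step]
      simp only [Bool.not_true, Bool.and_false, if_neg (by simp : ¬ (false = true))]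
      have := ih r (c + 1) true b1 hpos' (by omega) (by simp; omega)
        (by simp only [Bool.true_and]; exact (by omega : (2 ≤ c + 1 ↔ 1 ≤ c)).trans h1)
      rw [this]
      simp

-- ===== VERDICT (by name: the statement is the Claim_ definition above) =====
theorem repeat_adjacent_spec : Claim_equal_repeat_adjacent := by
  intro s _
  unfold Spec_repeat_adjacent repeat_adjacent repeat_adjacent_alt
  rw [pv_main (pvRle (s.toList ++ ['_'])) 0 0 false false (pvRle_pos _) le_rfl
    (by simp) (by simp)]
  rw [pvCountZ_pad]
  simp
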